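-- pv_equiv track=rewrite | github.com/gabriellaec/desoft-analise-exercicios | backup/user_387/ch47_2020_03_08_16_55_50_194165.py | estritamente_crescente
-- ===== SOURCE A (Python) =====
-- def estritamente_crescente(a):
--
--     b = a
--     c = []
--     a = a[::-1]
--
--     for i in range(len(a)):
--         for j in range(i + 1, len(a)):
--
--             if a[i] <= a[j]:
--                 c.append(a[i])
--
--     for val in c:
--         b.remove(val)
--
--     return(b)
-- ===== SOURCE B (Python) =====
-- def estritamente_crescente(a):
--     # Plan the deletions first: each element owes one deletion per earlier
--     # element that is >= it.  Then delete, in one pass, the first that-many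
--     # occurrences of each value.  (Mutates a in place and returns it.)
--     removals = {}
--     for p in range(len(a)):
--         v = a[p]
--         removals[v] = removals.get(v, 0) + sum(1 for x in a[:p] if x >= v)
--     out = []
--     for v in a:
--         if removals.get(v, 0) > 0:
--             removals[v] -= 1
--         else:
--             out.append(v)
--     a[:] = out
--     return a
-- ===== Notes on version B (the rewrite author's own statement) =====
-- stated objective: alternative
-- what changed: B replaces A's reversed-list pair scan that builds an explicit removal list and then mutates via repeated list.remove by a two-phase plan: a dict tallying, per value, how many copies to delete (one per earlier >= element), then a single linear pass that skips the first that-many occurrences of each value; Pre_ excludes the inputs on which A's remove raises ValueError (a value scheduled for more removals than it occurs).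
import Mathlib
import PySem

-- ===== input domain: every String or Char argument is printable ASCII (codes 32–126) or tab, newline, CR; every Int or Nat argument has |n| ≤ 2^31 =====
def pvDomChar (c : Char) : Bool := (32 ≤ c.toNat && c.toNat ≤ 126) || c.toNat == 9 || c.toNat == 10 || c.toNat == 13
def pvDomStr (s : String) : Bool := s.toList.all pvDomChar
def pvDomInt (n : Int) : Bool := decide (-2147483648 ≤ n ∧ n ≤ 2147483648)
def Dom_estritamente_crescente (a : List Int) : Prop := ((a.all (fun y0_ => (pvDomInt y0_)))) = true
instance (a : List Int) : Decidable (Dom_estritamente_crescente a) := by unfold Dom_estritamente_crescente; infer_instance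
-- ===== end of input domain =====

-- B plans per-value deletion counts in a dict and applies them in one linear pass,
-- instead of A's explicit removal list plus repeated list.remove (alternative
-- decomposition, same asymptotic cost). Both Pythons mutate the argument list in
-- place (A via remove, B via a[:] = out); the equivalence proved is about the
-- return value (which is that same mutated list in both).

-- ===== PORT A =====
def estritamente_crescente (a : List Int) : List Int :=
  let b := a
  -- a = a[::-1]  (slice? with step -1 is always 'some'; getD is exact)
  let arev := (PySem.List.slice? a none none (-1)).getD []
  let n : Int := PySem.List.len arev
  let c : List Int :=
    (PySem.List.pyRange 0 n).foldl (fun c i =>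
      (PySem.List.pyRange (i+1) n).foldl (fun c j =>
        if PySem.List.pyGetD arev i 0 ≤ PySem.List.pyGetD arev j 0 then
          c ++ [PySem.List.pyGetD arev i 0]
        else c) c) []
  -- b.remove(val): raises ValueError when val ∉ b — exactly those inputs are
  -- excluded by Pre_, so inside Pre_ the 'getD b' default is never the taken branch
  c.foldl (fun b val => (PySem.List.remove? b val).getD b) b

-- ===== PORT B =====
def estritamente_crescente_alt (a : List Int) : List Int :=
  -- removals[v] = removals.get(v, 0) + sum(1 for x in a[:p] if x >= v), v = a[p]
  let removals : PySem.Dict Int Int :=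
    (PySem.List.pyRange 0 (PySem.List.len a)).foldl (fun d p =>
      let v := PySem.List.pyGetD a p 0
      d.insert v (d.getD v 0 +
        (PySem.List.slice a none (some p)).foldl (fun s x => if x ≥ v then s + 1 else s) 0))
      PySem.Dict.empty
  -- for v in a: skip it while removals.get(v, 0) > 0, else keep it
  let st :=
    a.foldl (fun (st : PySem.Dict Int Int × List Int) v =>
      if st.1.getD v 0 > 0 then (st.1.insert v (st.1.getD v 0 - 1), st.2)
      else (st.1, st.2 ++ [v])) (removals, [])
  -- a[:] = out; return a  (the return value is out)
  st.2

-- ===== PRECONDITION & SPEC =====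
-- pvPairs a v = number of index pairs q < p with a[p] = v and a[q] ≥ v
-- (= how many copies of v A's loops schedule for removal)
def pvPairs (a : List Int) (v : Int) : Nat :=
  match a with
  | [] => 0
  | x :: xs => (if v ≤ x then xs.count v else 0) + pvPairs xs v

-- Pre_ excludes exactly the inputs on which A raises ValueError in b.remove(val):
-- those where some value is scheduled for more removals than it occurs.
def Pre_estritamente_crescente (a : List Int) : Prop :=
  ∀ v ∈ a, pvPairs a v ≤ a.count v
instance (a : List Int) : Decidable (Pre_estritamente_crescente a) := by
  unfold Pre_estritamente_crescente; infer_instance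

def pvWitness_estritamente_crescente : List Int := [3, 1, 2, 3]

def Spec_estritamente_crescente (a : List Int) (out : List Int) : Prop :=
  out = estritamente_crescente_alt a
instance (a : List Int) (out : List Int) : Decidable (Spec_estritamente_crescente a out) := by
  unfold Spec_estritamente_crescente; infer_instance

-- ===== CLAIM (what is proved, stated in full; the proofs are below) =====
def Claim_equal_estritamente_crescente : Prop :=
  ∀ (a : List Int), Dom_estritamente_crescente a → Pre_estritamente_crescente a →
    Spec_estritamente_crescente a (estritamente_crescente a)

-- ===== LEMMAS AND PROOFS =====

-- the removal list c that A builds, structurally over the reversed list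
def csList : List Int → List Int
  | [] => []
  | x :: xs => (xs.filter (fun y => decide (x ≤ y))).map (fun _ => x) ++ csList xs

-- dropping, left to right, the first (m v) occurrences of each value v
def dmRun : List Int → (Int → Int) → List Int
  | [], _ => []
  | x :: xs, m =>
      if 0 < m x then dmRun xs (fun v => if v = x then m x - 1 else m v)
      else x :: dmRun xs m

theorem count_map_const (m : List Int) (x v : Int) :
    (m.map (fun _ => x)).count v = if x = v then m.length else 0 := by
  induction m with
  | nil => simp
  | cons y ys ih =>
    simp [List.count_cons]
    split_ifs <;> simp_all

theorem pvPairs_append (ys : List Int) (x v : Int) :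
    pvPairs (ys ++ [x]) v =
      pvPairs ys v + (if x = v then ys.countP (fun y => decide (v ≤ y)) else 0) := by
  induction ys with
  | nil => simp [pvPairs]
  | cons y ys ih =>
    simp only [List.cons_append, pvPairs, ih, List.count_append, List.countP_cons]
    split_ifs <;> simp_all <;> omega

theorem csList_count (l : List Int) (v : Int) :
    (csList l).count v = pvPairs l.reverse v := by
  induction l with
  | nil => simp [csList, pvPairs]
  | cons x xs ih =>
    simp only [csList, List.count_append, count_map_const,
      List.reverse_cons, pvPairs_append, ih]
    rw [Nat.add_comm]
    congr 1
    split_ifs with h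
    · subst h
      rw [← List.countP_reverse, List.countP_eq_length_filter, List.reverse_reverse]
    · rfl

theorem pvPairs_not_mem (a : List Int) (v : Int) (h : v ∉ a) : pvPairs a v = 0 := by
  induction a with
  | nil => rfl
  | cons x xs ih =>
    simp only [List.mem_cons, not_or] at h
    simp [pvPairs, List.count_eq_zero.mpr h.2, ih h.2]

theorem dmRun_cons_pos (x : Int) (xs : List Int) (m : Int → Int) (h : 0 < m x) :
    dmRun (x :: xs) m = dmRun xs (fun v => if v = x then m x - 1 else m v) := by
  simp [dmRun, h]

theorem dmRun_cons_nonpos (x : Int) (xs : List Int) (m : Int → Int) (h : ¬ 0 < m x) :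
    dmRun (x :: xs) m = x :: dmRun xs m := by
  simp [dmRun, h]

theorem dm_congr (b : List Int) : ∀ (m1 m2 : Int → Int),
    (∀ v, m1 v = m2 v ∨ (m1 v ≤ 0 ∧ m2 v ≤ 0)) → dmRun b m1 = dmRun b m2 := by
  induction b with
  | nil => intros; rfl
  | cons x xs ih =>
    intro m1 m2 h
    have hx := h x
    by_cases h1 : 0 < m1 x
    · have h2 : 0 < m2 x := by rcases hx with h | h <;> omega
      have hm : m1 x = m2 x := by rcases hx with h | h <;> omega
      rw [dmRun_cons_pos _ _ _ h1, dmRun_cons_pos _ _ _ h2]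
      apply ih
      intro v
      by_cases hv : v = x
      · subst hv; simp [hm]
      · simpa [hv] using h v
    · have h2 : ¬ 0 < m2 x := by rcases hx with h | h <;> omega
      rw [dmRun_cons_nonpos _ _ _ h1, dmRun_cons_nonpos _ _ _ h2]
      exact congrArg (x :: ·) (ih m1 m2 h)

theorem dm_nonpos (b : List Int) : ∀ (m : Int → Int), (∀ v, m v ≤ 0) → dmRun b m = b := by
  induction b with
  | nil => intros; rfl
  | cons x xs ih =>
    intro m h
    rw [dmRun_cons_nonpos _ _ _ (by have := h x; omega)]
    exact congrArg (x :: ·) (ih m h)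

theorem dm_erase (b : List Int) : ∀ (m : Int → Int) (x : Int), x ∈ b → 0 ≤ m x →
    dmRun b (fun v => if v = x then m x + 1 else m v) = dmRun (b.erase x) m := by
  induction b with
  | nil => simp
  | cons y ys ih =>
    intro m x hx hm
    rcases eq_or_ne y x with hyx | hyx
    · subst hyx
      rw [List.erase_cons_head]
      rw [dmRun_cons_pos _ _ _ (by simp; omega)]
      apply dm_congr
      intro v
      by_cases hv : v = y <;> simp [hv]
    · rw [List.erase_cons_tail (by simpa using hyx)]
      have hxys : x ∈ ys := by
        rcases List.mem_cons.mp hx with h | h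
        · exact absurd h.symm hyx
        · exact h
      by_cases hy : 0 < m y
      · rw [dmRun_cons_pos _ _ _ (by simpa [hyx] using hy),
            dmRun_cons_pos _ _ _ hy]
        have := ih (fun v => if v = y then m y - 1 else m v) x hxys
          (by simp [(Ne.symm hyx : x ≠ y)]; omega)
        rw [← this]
        apply congrArg (dmRun ys)
        funext v
        by_cases hv1 : v = x <;> by_cases hv2 : v = y <;>
          simp_all [(Ne.symm hyx : x ≠ y)]
      · rw [dmRun_cons_nonpos _ _ _ (by simpa [hyx] using hy),
            dmRun_cons_nonpos _ _ _ hy]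
        exact congrArg (y :: ·) (ih m x hxys hm)

theorem removal_fold (c : List Int) : ∀ (b : List Int), (∀ v, c.count v ≤ b.count v) →
    c.foldl (fun b val => (PySem.List.remove? b val).getD b) b
      = dmRun b (fun v => (c.count v : Int)) := by
  induction c with
  | nil => intro b _; exact (dm_nonpos b _ (by simp)).symm
  | cons x c' ih =>
    intro b h
    have hxb : x ∈ b := by
      have := h x
      simp [List.count_cons_self] at this
      exact List.count_pos_iff.mp (by omega)
    have hrm : PySem.List.remove? b x = some (b.erase x) :=
      PySem.List.remove?_eq_some_erase b x hxb
    simp only [List.foldl_cons, hrm, Option.getD_some]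
    have hcounts : ∀ v, c'.count v ≤ (b.erase x).count v := by
      intro v
      rcases eq_or_ne v x with hv | hv
      · subst hv
        have := h v
        rw [List.count_erase_self]
        simp [List.count_cons_self] at this
        omega
      · rw [List.count_erase_of_ne hv]
        have := h v
        simp [List.count_cons] at this
        omega
    rw [ih (b.erase x) hcounts]
    rw [← dm_erase b (fun v => (c'.count v : Int)) x hxb (by positivity)]
    apply dm_congr
    intro v
    left
    rcases eq_or_ne v x with hv | hv
    · subst hv; simp [List.count_cons_self]
    · simp [hv, Ne.symm hv]

theorem outerA (l : List Int) : ∀ (acc : List Int),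
    (List.range l.length).foldl (fun c k =>
        c ++ ((l.drop (k+1)).filter (fun y => decide (l.getD k 0 ≤ y))).map
              (fun _ => l.getD k 0)) acc
      = acc ++ csList l := by
  induction l with
  | nil => intro acc; simp [csList]
  | cons x xs ih =>
    intro acc
    rw [List.length_cons, List.range_succ_eq_map, List.foldl_cons, List.foldl_map]
    simp only [List.getD_cons_zero, List.drop_succ_cons, List.getD_cons_succ,
      List.drop_zero, Nat.succ_eq_add_one]
    rw [ih]
    simp [csList]

theorem foldl_app_const (x : Int) (l : List Int) : ∀ (acc : List Int),
    l.foldl (fun acc y => if x ≤ y then acc ++ [x] else acc) acc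
      = acc ++ (l.filter (fun y => decide (x ≤ y))).map (fun _ => x) := by
  induction l with
  | nil => simp
  | cons y ys ih =>
    intro acc
    by_cases h : x ≤ y <;> simp [h, ih]

theorem cPort_eq (a : List Int) :
    (PySem.List.pyRange 0 (PySem.List.len a.reverse)).foldl (fun c i =>
      (PySem.List.pyRange (i+1) (PySem.List.len a.reverse)).foldl (fun c j =>
        if PySem.List.pyGetD a.reverse i 0 ≤ PySem.List.pyGetD a.reverse j 0 then
          c ++ [PySem.List.pyGetD a.reverse i 0]
        else c) c) []
    = csList a.reverse := by
  set l := a.reverse with hl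
  rw [PySem.List.len_eq, PySem.List.pyRange_zero_natCast, List.foldl_map]
  have hbody : ∀ (c : List Int), ∀ k ∈ List.range l.length,
      (PySem.List.pyRange ((k:Int)+1) (PySem.List.len l)).foldl (fun c j =>
        if PySem.List.pyGetD l (k:Int) 0 ≤ PySem.List.pyGetD l j 0 then
          c ++ [PySem.List.pyGetD l (k:Int) 0]
        else c) c
      = c ++ ((l.drop (k+1)).filter (fun y => decide (l.getD k 0 ≤ y))).map
              (fun _ => l.getD k 0) := by
    intro c k hk
    rw [PySem.List.len_eq]
    rw [PySem.List.foldl_pyRange_pyGetD' l 0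
        (fun c y => if PySem.List.pyGetD l (k:Int) 0 ≤ y then c ++ [PySem.List.pyGetD l (k:Int) 0] else c)
        c (by positivity)]
    rw [show ((k:Int)+1).toNat = k+1 by omega]
    rw [PySem.List.pyGetD_natCast]
    exact foldl_app_const _ _ _
  calc (List.range l.length).foldl _ []
      = (List.range l.length).foldl (fun c k =>
          c ++ ((l.drop (k+1)).filter (fun y => decide (l.getD k 0 ≤ y))).map
              (fun _ => l.getD k 0)) [] := by
        apply PySem.List.foldl_congr_mem
        intro c k hk
        exact hbody c k hk
    _ = csList l := by rw [outerA]; rfl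

theorem portA_eq (a : List Int) (hpre : Pre_estritamente_crescente a) :
    estritamente_crescente a = dmRun a (fun v => (pvPairs a v : Int)) := by
  unfold estritamente_crescente
  simp only [PySem.List.slice?_none_none_neg_one, Option.getD_some]
  rw [cPort_eq a]
  have hcnt : ∀ v, (csList a.reverse).count v = pvPairs a v := by
    intro v; rw [csList_count, List.reverse_reverse]
  rw [removal_fold _ a (by
    intro v
    rw [hcnt v]
    by_cases hv : v ∈ a
    · exact hpre v hv
    · rw [pvPairs_not_mem a v hv]; omega)]
  exact congrArg (dmRun a) (funext fun v => by rw [hcnt v])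

-- ===== B-side lemmas =====

-- B's planning loop, over List.range with prefix counting
def pvPlan (a : List Int) : PySem.Dict Int Int :=
  (List.range a.length).foldl (fun d p =>
    d.insert (a.getD p 0) (d.getD (a.getD p 0) 0 +
      ((a.take p).countP (fun x => decide (a.getD p 0 ≤ x)) : Int))) PySem.Dict.empty

theorem pvPlan_getD (a : List Int) (v : Int) :
    (pvPlan a).getD v 0 = (pvPairs a v : Int) := by
  induction a using List.reverseRecOn with
  | nil => simp [pvPlan, pvPairs, PySem.Dict.getD_empty]
  | append_singleton ys x ih =>
    unfold pvPlan
    rw [List.length_append, List.length_singleton, List.range_succ, List.foldl_append]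
    have hbody : ∀ (d : PySem.Dict Int Int), ∀ k ∈ List.range ys.length,
        d.insert ((ys ++ [x]).getD k 0) (d.getD ((ys ++ [x]).getD k 0) 0 +
          (((ys ++ [x]).take k).countP (fun t => decide ((ys ++ [x]).getD k 0 ≤ t)) : Int))
        = d.insert (ys.getD k 0) (d.getD (ys.getD k 0) 0 +
          ((ys.take k).countP (fun t => decide (ys.getD k 0 ≤ t)) : Int)) := by
      intro d k hk
      rw [List.mem_range] at hk
      have h1 : (ys ++ [x]).getD k 0 = ys.getD k 0 := by
        simp [List.getD_eq_getElem?_getD, List.getElem?_append_left hk]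
      have h2 : (ys ++ [x]).take k = ys.take k :=
        List.take_append_of_le_length (by omega)
      rw [h1, h2]
    rw [PySem.List.foldl_congr_mem _ _ _ _ hbody]
    have hpl : (List.range ys.length).foldl (fun d p =>
        d.insert (ys.getD p 0) (d.getD (ys.getD p 0) 0 +
          ((ys.take p).countP (fun t => decide (ys.getD p 0 ≤ t)) : Int))) PySem.Dict.empty
        = pvPlan ys := rfl
    rw [hpl]
    simp only [List.foldl_cons, List.foldl_nil]
    have hgd : (ys ++ [x]).getD ys.length 0 = x := by
      simp [List.getD_eq_getElem?_getD]
    have htk : (ys ++ [x]).take ys.length = ys := by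
      rw [List.take_append_of_le_length (le_refl _), List.take_length]
    rw [hgd, htk, PySem.Dict.getD_insert, pvPairs_append]
    by_cases hv : v = x
    · subst hv
      rw [if_pos rfl, if_pos rfl, ih]
      push_cast
      ring
    · rw [if_neg hv, if_neg (fun h => hv h.symm)]
      simp [ih]

-- B's planning loop as written in the port equals pvPlan
theorem planPort_eq (a : List Int) :
    (PySem.List.pyRange 0 (PySem.List.len a)).foldl (fun d p =>
      d.insert (PySem.List.pyGetD a p 0) (d.getD (PySem.List.pyGetD a p 0) 0 +
        (PySem.List.slice a none (some p)).foldl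
          (fun s x => if x ≥ PySem.List.pyGetD a p 0 then s + 1 else s) 0))
      PySem.Dict.empty
    = pvPlan a := by
  rw [PySem.List.len_eq, PySem.List.pyRange_zero_natCast, List.foldl_map]
  apply PySem.List.foldl_congr_mem
  intro d k hk
  rw [List.mem_range] at hk
  rw [PySem.List.pyGetD_natCast, PySem.List.slice_to_natCast]
  rw [PySem.List.foldl_ite_add_one]
  simp

-- B's application loop is dmRun on the dict's lookups
theorem applyLoop_eq (l : List Int) : ∀ (d : PySem.Dict Int Int) (out : List Int),
    (l.foldl (fun (st : PySem.Dict Int Int × List Int) v =>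
        if st.1.getD v 0 > 0 then (st.1.insert v (st.1.getD v 0 - 1), st.2)
        else (st.1, st.2 ++ [v])) (d, out)).2
      = out ++ dmRun l (fun v => d.getD v 0) := by
  induction l with
  | nil => intro d out; simp [dmRun]
  | cons x xs ih =>
    intro d out
    by_cases h : d.getD x 0 > 0
    · rw [List.foldl_cons]
      simp only [if_pos h]
      rw [ih]
      rw [dmRun_cons_pos x xs (fun v => d.getD v 0) h]
      have hf : (fun v => (d.insert x (d.getD x 0 - 1)).getD v 0)
          = (fun v => if v = x then d.getD x 0 - 1 else d.getD v 0) :=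
        funext fun v => by rw [PySem.Dict.getD_insert]
      rw [hf]
    · rw [List.foldl_cons]
      simp only [if_neg h]
      rw [ih]
      rw [dmRun_cons_nonpos x xs (fun v => d.getD v 0) h]
      simp

theorem portB_eq (a : List Int) :
    estritamente_crescente_alt a = dmRun a (fun v => (pvPairs a v : Int)) := by
  unfold estritamente_crescente_alt
  rw [planPort_eq a, applyLoop_eq a (pvPlan a) []]
  simp only [List.nil_append]
  apply dm_congr
  intro v
  left
  rw [pvPlan_getD]

-- ===== VERDICT (by name: the statement is the Claim_ definition above) =====
theorem estritamente_crescente_spec : Claim_equal_estritamente_crescente := by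
  intro a _ hpre
  unfold Spec_estritamente_crescente
  rw [portA_eq a hpre, portB_eq a]
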